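-- pv_equiv track=rewrite | github.com/DimaVasiliu/timrx-3d-print | backend/services/pricing_service.py | _is_video_variant_code
-- ===== SOURCE A (Python) =====
-- def _is_video_variant_code(action_key: str) -> bool:
--     """
--     Check if an action key is a Veo video variant code.
--
--     Pattern: video_{text_generate|image_animate|image_transition}_{duration}s_{resolution}
--     """
--     if not action_key.startswith("video_"):
--         return False
--
--     valid_prefixes = ("video_text_generate_", "video_image_animate_", "video_image_transition_")
--     for prefix in valid_prefixes:
--         if action_key.startswith(prefix):
--             suffix = action_key[len(prefix):]
--             valid_suffixes = {"4s_720p", "6s_720p", "8s_720p", "8s_1080p", "8s_4k"}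
--             return suffix in valid_suffixes
--
--     return False
-- ===== SOURCE B (Python) =====
-- VALID_KEYS = {
--     prefix + suffix
--     for prefix in ("video_text_generate_", "video_image_animate_", "video_image_transition_")
--     for suffix in ("4s_720p", "6s_720p", "8s_720p", "8s_1080p", "8s_4k")
-- }
--
--
-- def _is_video_variant_code(action_key: str) -> bool:
--     """Check if an action key is a Veo video variant code (precomputed table lookup)."""
--     return action_key in VALID_KEYS
-- ===== Notes on version B (the rewrite author's own statement) =====
-- stated objective: simpler
-- what changed: Replaces the video_ guard, the prefix-scanning loop and the per-call suffix-set lookup with a single membership test in a precomputed table of all 15 valid keys (Cartesian product of the 3 prefixes and 5 suffixes).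
import Mathlib
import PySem

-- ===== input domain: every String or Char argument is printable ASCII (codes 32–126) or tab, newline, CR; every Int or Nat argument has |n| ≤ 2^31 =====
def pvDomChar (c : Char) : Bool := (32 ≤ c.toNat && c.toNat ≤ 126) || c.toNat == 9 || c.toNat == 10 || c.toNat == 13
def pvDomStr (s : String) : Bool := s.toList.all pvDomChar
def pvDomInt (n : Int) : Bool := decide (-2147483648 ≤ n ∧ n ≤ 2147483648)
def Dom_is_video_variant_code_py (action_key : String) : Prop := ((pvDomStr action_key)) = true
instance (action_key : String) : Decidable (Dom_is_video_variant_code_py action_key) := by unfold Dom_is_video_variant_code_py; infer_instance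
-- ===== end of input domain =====

-- B replaces A's video_ guard, prefix-scanning loop and per-call suffix-set lookup by a
-- single membership test in a precomputed table of all 15 valid keys (objective: simpler).

-- ===== PORT A =====
-- the 'for prefix in valid_prefixes:' loop with its early returns
def pvLoopA (action_key : String) : List String → Bool
  | [] => false
  | p :: ps =>
    if PySem.Str.startswith action_key p then
      PySem.Set.contains
        (PySem.Set.ofList ["4s_720p", "6s_720p", "8s_720p", "8s_1080p", "8s_4k"])
        (PySem.Str.slice action_key (some (PySem.Str.len p)) none)
    else pvLoopA action_key ps

def is_video_variant_code_py (action_key : String) : Bool :=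
  if !PySem.Str.startswith action_key "video_" then false
  else
    pvLoopA action_key
      ["video_text_generate_", "video_image_animate_", "video_image_transition_"]

-- ===== PORT B =====
-- VALID_KEYS: set comprehension over the Cartesian product of prefixes and suffixes
def pvValidKeys : PySem.Set String :=
  PySem.Set.ofList
    (["video_text_generate_", "video_image_animate_", "video_image_transition_"].flatMap
      (fun prefix_ =>
        ["4s_720p", "6s_720p", "8s_720p", "8s_1080p", "8s_4k"].map
          (fun suffix => prefix_ ++ suffix)))

def is_video_variant_code_py_alt (action_key : String) : Bool :=
  PySem.Set.contains pvValidKeys action_key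

-- ===== PRECONDITION & SPEC =====
def Spec_is_video_variant_code_py (action_key : String) (out : Bool) : Prop := out = is_video_variant_code_py_alt action_key
instance (action_key : String) (out : Bool) : Decidable (Spec_is_video_variant_code_py action_key out) := by unfold Spec_is_video_variant_code_py; infer_instance

-- ===== CLAIM (what is proved, stated in full; the proofs are below) =====
def Claim_equal_is_video_variant_code_py : Prop := ∀ (action_key : String), Dom_is_video_variant_code_py action_key → Spec_is_video_variant_code_py action_key (is_video_variant_code_py action_key)

-- ===== LEMMAS AND PROOFS =====

-- if s starts with p and s[len(p):] = t then s is the literal concatenation p ++ t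
lemma pv_key_of_startswith (s p t : String)
    (hp : PySem.Str.startswith s p = true)
    (ht : PySem.Str.slice s (some (PySem.Str.len p)) none = t) :
    s = p ++ t := by
  rw [← String.toList_inj] at ht ⊢
  rw [PySem.Str.startswith_eq, PySem.Chars.startswith_iff] at hp
  obtain ⟨u, hu⟩ := hp
  rw [PySem.Str.toList_slice, PySem.Chars.slice_eq_listSlice, PySem.Str.len_eq,
    PySem.List.slice_from_natCast, ← hu, List.drop_left] at ht
  simp [← hu, ← ht]

-- A returns true on every key of B's table
lemma pv_A_true_on_keys :
    ∀ k ∈ pvValidKeys, is_video_variant_code_py k = true := by decide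

-- from a true startswith + a true suffix-set test, s is in B's table
lemma pv_mem_of_hit (s p : String)
    (hp : PySem.Str.startswith s p = true)
    (hc : PySem.Set.contains
        (PySem.Set.ofList ["4s_720p", "6s_720p", "8s_720p", "8s_1080p", "8s_4k"])
        (PySem.Str.slice s (some (PySem.Str.len p)) none) = true)
    (hkeys : ∀ t ∈ (["4s_720p", "6s_720p", "8s_720p", "8s_1080p", "8s_4k"] : List String),
        p ++ t ∈ pvValidKeys) :
    s ∈ pvValidKeys := by
  rw [PySem.Set.contains, List.contains_iff_mem, PySem.Set.mem_ofList] at hc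
  rw [pv_key_of_startswith s p _ hp rfl]
  exact hkeys _ hc

lemma pv_main (s : String) :
    is_video_variant_code_py s = is_video_variant_code_py_alt s := by
  unfold is_video_variant_code_py_alt PySem.Set.contains
  by_cases hs : s ∈ pvValidKeys
  · rw [List.contains_iff_mem.mpr hs]
    exact pv_A_true_on_keys s hs
  · rw [Bool.eq_false_iff.mpr (fun h => hs (List.contains_iff_mem.mp h))]
    simp only [is_video_variant_code_py, pvLoopA]
    split_ifs with h0 h1 h2 h3
    · rfl
    · rw [Bool.eq_false_iff]; intro hc; exact hs (pv_mem_of_hit s _ h1 hc (by decide))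
    · rw [Bool.eq_false_iff]; intro hc; exact hs (pv_mem_of_hit s _ h2 hc (by decide))
    · rw [Bool.eq_false_iff]; intro hc; exact hs (pv_mem_of_hit s _ h3 hc (by decide))
    · rfl

-- ===== VERDICT (by name: the statement is the Claim_ definition above) =====
theorem is_video_variant_code_py_spec : Claim_equal_is_video_variant_code_py := by
  intro s _
  unfold Spec_is_video_variant_code_py
  exact pv_main s
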